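-- pv_equiv track=rewrite | github.com/dvc0310/Interview-prep-stuff | leetcode/min_reorder.py | dfs
-- ===== SOURCE A (Python) =====
-- def dfs(start, graph, roadSet):
--     counter = 0
--     stack = [(start, -1)]  # node and parent
--
--     while stack:
--         node, parent = stack.pop()
--         for neighbor in graph[node]:
--             if neighbor == parent:
--                 continue
--             if (node, neighbor) in roadSet:
--                 counter += 1
--             stack.append((neighbor, node))
--
--     return counter
-- ===== SOURCE B (Python) =====
-- def dfs(start, graph, roadSet):
--     def go(node, parent):
--         count = 0
--         for neighbor in graph[node]:
--             if neighbor != parent: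
--                 if (node, neighbor) in roadSet:
--                     count += 1
--                 count += go(neighbor, node)
--         return count
--     return go(start, -1)
-- ===== Notes on version B (the rewrite author's own statement) =====
-- stated objective: idiomatic
-- what changed: Replaced the explicit stack + while-loop state machine with the idiomatic recursive DFS helper that sums the away-pointing edges of each subtree (same traversal, recursive decomposition).
import Mathlib
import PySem

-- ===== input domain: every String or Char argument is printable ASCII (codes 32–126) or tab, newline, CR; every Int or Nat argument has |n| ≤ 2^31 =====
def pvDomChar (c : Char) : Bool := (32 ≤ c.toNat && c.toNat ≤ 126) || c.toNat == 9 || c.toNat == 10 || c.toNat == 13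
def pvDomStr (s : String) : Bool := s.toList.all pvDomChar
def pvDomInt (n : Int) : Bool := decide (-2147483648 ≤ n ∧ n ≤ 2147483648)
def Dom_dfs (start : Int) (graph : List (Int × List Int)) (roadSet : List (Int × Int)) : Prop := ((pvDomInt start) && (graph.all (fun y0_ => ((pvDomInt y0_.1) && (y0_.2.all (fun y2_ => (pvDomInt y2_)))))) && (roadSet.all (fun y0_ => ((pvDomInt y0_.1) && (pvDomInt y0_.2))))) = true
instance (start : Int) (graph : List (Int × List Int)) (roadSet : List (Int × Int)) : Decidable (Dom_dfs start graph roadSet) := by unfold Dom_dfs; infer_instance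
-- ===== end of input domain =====

-- B replaces A's explicit stack + while-loop with the idiomatic recursive DFS that sums away-pointing edges per subtree; same traversal, same cost. Equality is about return values (neither mutates its arguments).

-- ===== PORT A =====
-- total size of all adjacency lists: any non-repeating (node, parent) traversal state path is
-- shorter than pvW + 1, so this budget is a pure totality guard for the ports (Python has none)
def pvW (graph : List (Int × List Int)) : Nat := (graph.map (fun kv => kv.2.length)).sum

-- termination measure for A's while-loop: Σ over the stack of (w+1)^budget
def stackM (w : Nat) (st : List ((Int × Int) × Nat)) : Nat := (st.map (fun e => (w + 1) ^ e.2)).sum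

-- the body of A's `for neighbor in graph[node]` loop, acting on (stack, counter);
-- the budget b is the totality guard: Python pushes unconditionally
def dfsBodyA (roadSet : List (Int × Int)) (node parent : Int) (b : Nat)
    (acc : List ((Int × Int) × Nat) × Int) (v : Int) : List ((Int × Int) × Nat) × Int :=
  if v == parent then acc
  else ((if b == 0 then acc.1 else ((v, node), b - 1) :: acc.1),
        acc.2 + (if roadSet.contains (node, v) then 1 else 0))

-- graph[node] is never longer than the total adjacency size (termination helper, cited by dfsLoop)
lemma adj_len_le (graph : List (Int × List Int)) (node : Int) :
    (((PySem.Dict.mk graph).get? node).getD []).length ≤ pvW graph := by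
  induction graph with
  | nil => simp [PySem.Dict.get?, pvW]
  | cons kv rest ih =>
      rw [show (kv :: rest) = ((kv.1, kv.2) :: rest) from rfl, PySem.Dict.get?_mk_cons]
      simp only [pvW, List.map_cons, List.sum_cons]
      split
      · simp
      · have : pvW rest = (rest.map (fun kv => kv.2.length)).sum := rfl
        omega

-- the inner fold with budget 0 pushes nothing (termination helper, cited by dfsLoop)
lemma foldA_fst_zero (roadSet : List (Int × Int)) (node parent : Int) :
    ∀ (L : List Int) (s : List ((Int × Int) × Nat)) (c : Int),
      (L.foldl (dfsBodyA roadSet node parent 0) (s, c)).1 = s := by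
  intro L
  induction L with
  | nil => intro s c; rfl
  | cons v L ih =>
      intro s c
      simp only [List.foldl_cons, dfsBodyA]
      split
      · exact ih s c
      · simp only [show ((0 : Nat) == 0) = true from rfl, if_true]
        exact ih s _

-- each pushed child contributes (w+1)^b' to the measure (termination helper, cited by dfsLoop)
lemma foldA_fst_succ (w : Nat) (roadSet : List (Int × Int)) (node parent : Int) (b' : Nat) :
    ∀ (L : List Int) (s : List ((Int × Int) × Nat)) (c : Int),
      stackM w ((L.foldl (dfsBodyA roadSet node parent (b' + 1)) (s, c)).1)
        ≤ stackM w s + L.length * (w + 1) ^ b' := by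
  intro L
  induction L with
  | nil => intro s c; simp
  | cons v L ih =>
      intro s c
      simp only [List.foldl_cons, dfsBodyA, List.length_cons]
      split
      · have := ih s c
        have hmul : L.length * (w + 1) ^ b' ≤ (L.length + 1) * (w + 1) ^ b' :=
          Nat.mul_le_mul_right _ (by omega)
        omega
      · simp only [show ((b' + 1 : Nat) == 0) = false by simp, Bool.false_eq_true, if_false,
          Nat.add_sub_cancel]
        have := ih ((((v, node), b')) :: s) (c + (if roadSet.contains (node, v) then 1 else 0))
        have hcons : stackM w ((((v, node), b')) :: s) = (w + 1) ^ b' + stackM w s := by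
          simp [stackM]
        have hmul : (L.length + 1) * (w + 1) ^ b' = L.length * (w + 1) ^ b' + (w + 1) ^ b' :=
          Nat.succ_mul _ _
        omega

-- one iteration of A's while-loop strictly decreases the measure (cited by dfsLoop's decreasing_by)
lemma fold_fst_lt (graph : List (Int × List Int)) (roadSet : List (Int × Int))
    (node parent : Int) (b : Nat) (rest : List ((Int × Int) × Nat)) (c : Int) :
    stackM (pvW graph)
        (((((PySem.Dict.mk graph).get? node).getD []).foldl (dfsBodyA roadSet node parent b) (rest, c)).1)
      < stackM (pvW graph) (((node, parent), b) :: rest) := by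
  have hcons : stackM (pvW graph) (((node, parent), b) :: rest)
      = (pvW graph + 1) ^ b + stackM (pvW graph) rest := by simp [stackM]
  cases b with
  | zero =>
      rw [foldA_fst_zero, hcons]
      have : 0 < (pvW graph + 1) ^ 0 := by simp
      omega
  | succ b' =>
      have h1 := foldA_fst_succ (pvW graph) roadSet node parent b'
        (((PySem.Dict.mk graph).get? node).getD []) rest c
      have h2 := adj_len_le graph node
      have hX : 0 < (pvW graph + 1) ^ b' := Nat.pow_pos (by omega)
      have h3 : (((PySem.Dict.mk graph).get? node).getD []).length * (pvW graph + 1) ^ b'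
          ≤ pvW graph * (pvW graph + 1) ^ b' := Nat.mul_le_mul_right _ h2
      have h4 : (pvW graph + 1) ^ (b' + 1) = pvW graph * (pvW graph + 1) ^ b' + (pvW graph + 1) ^ b' := by
        rw [pow_succ]
        ring
      omega

-- A: while stack: pop (node, parent); for neighbor in graph[node]: skip parent, count roadSet hits, push
-- (graph[node] on a missing key raises KeyError in Python: excluded by Pre_dfs; the port reads [] there)
def dfsLoop (graph : List (Int × List Int)) (roadSet : List (Int × Int)) :
    List ((Int × Int) × Nat) → Int → Int
  | [], counter => counter
  | ((node, parent), b) :: rest, counter =>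
      let s := (((PySem.Dict.mk graph).get? node).getD []).foldl (dfsBodyA roadSet node parent b) (rest, counter)
      dfsLoop graph roadSet s.1 s.2
  termination_by st _ => stackM (pvW graph) st
  decreasing_by exact fold_fst_lt graph roadSet node parent b rest counter

def dfs (start : Int) (graph : List (Int × List Int)) (roadSet : List (Int × Int)) : Int :=
  dfsLoop graph roadSet [((start, -1), pvW graph + 1)] 0

-- ===== PORT B =====
-- B: def go(node, parent): sum over graph[node] minus parent of roadSet hit + go(neighbor, node)
-- (the Nat budget is the same totality guard as A's; Python's recursion carries none)
def dfsRecB (graph : List (Int × List Int)) (roadSet : List (Int × Int)) :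
    Nat → Int → Int → Int
  | 0, node, parent =>
      (((PySem.Dict.mk graph).get? node).getD []).foldl
        (fun count v => if v == parent then count
          else count + (if roadSet.contains (node, v) then 1 else 0)) 0
  | b + 1, node, parent =>
      (((PySem.Dict.mk graph).get? node).getD []).foldl
        (fun count v => if v == parent then count
          else count + (if roadSet.contains (node, v) then 1 else 0) + dfsRecB graph roadSet b v node) 0

def dfs_alt (start : Int) (graph : List (Int × List Int)) (roadSet : List (Int × Int)) : Int :=
  dfsRecB graph roadSet (pvW graph + 1) start (-1)

-- ===== PRECONDITION & SPEC =====
-- successor traversal states of state (node, parent): (neighbor, node) for non-parent neighbors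
def pvStep (graph : List (Int × List Int)) (q : Int × Int) : List (Int × Int) :=
  match (PySem.Dict.mk graph).get? q.1 with
  | some L => (L.filter (fun v => !(v == q.2))).map (fun v => (v, q.1))
  | none => []

-- reachability closure over traversal states (at most pvW + 1 distinct states exist)
def pvClosure (graph : List (Int × List Int)) : List (Int × Int) → Nat → List (Int × Int)
  | R, 0 => R
  | R, k + 1 =>
      pvClosure graph (R ++ ((R.flatMap (pvStep graph)).filter (fun q => !(R.contains q))).eraseDups) k

-- Pre_dfs holds exactly on the inputs where Python A returns: every traversal state (node, parent)
-- reachable from (start, -1) has its node as a key of graph (otherwise graph[node] raises KeyError)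
-- and no reachable state lies on a non-backtracking cycle (otherwise the while-loop never empties
-- its stack). A graph-reachability / acyclicity property of the input, not a run of either program.
def Pre_dfs (start : Int) (graph : List (Int × List Int)) (roadSet : List (Int × Int)) : Prop :=
  ((pvClosure graph [(start, -1)] (pvW graph + 1)).all
      (fun q => ((PySem.Dict.mk graph).get? q.1).isSome)
    && (pvClosure graph [(start, -1)] (pvW graph + 1)).all
      (fun q => !((pvClosure graph (pvStep graph q) (pvW graph + 1)).contains q))) = true

instance (start : Int) (graph : List (Int × List Int)) (roadSet : List (Int × Int)) :
    Decidable (Pre_dfs start graph roadSet) := by unfold Pre_dfs; infer_instance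

def pvWitness_dfs : Int × (List (Int × List Int)) × (List (Int × Int)) :=
  (0, [(0, [1, 2]), (1, [0]), (2, [0])], [(0, 1), (2, 0)])

def Spec_dfs (start : Int) (graph : List (Int × List Int)) (roadSet : List (Int × Int)) (out : Int) : Prop :=
  out = dfs_alt start graph roadSet

instance (start : Int) (graph : List (Int × List Int)) (roadSet : List (Int × Int)) (out : Int) :
    Decidable (Spec_dfs start graph roadSet out) := by unfold Spec_dfs; infer_instance

-- ===== CLAIM (what is proved, stated in full; the proofs are below) =====
def Claim_equal_dfs : Prop := ∀ (start : Int) (graph : List (Int × List Int)) (roadSet : List (Int × Int)), Dom_dfs start graph roadSet → Pre_dfs start graph roadSet → Spec_dfs start graph roadSet (dfs start graph roadSet)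

-- ===== LEMMAS AND PROOFS =====
-- the recursive count pending on A's stack
def pvS (graph : List (Int × List Int)) (roadSet : List (Int × Int))
    (st : List ((Int × Int) × Nat)) : Int :=
  (st.map (fun e => dfsRecB graph roadSet e.2 e.1.1 e.1.2)).sum

lemma foldB0_shift (roadSet : List (Int × Int)) (node parent : Int) :
    ∀ (L : List Int) (x a : Int),
      L.foldl (fun count v => if v == parent then count
          else count + (if roadSet.contains (node, v) then 1 else 0)) (x + a)
        = x + L.foldl (fun count v => if v == parent then count
            else count + (if roadSet.contains (node, v) then 1 else 0)) a := by
  intro L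
  induction L with
  | nil => intro x a; rfl
  | cons v L ih =>
      intro x a
      simp only [List.foldl_cons]
      split
      · exact ih x a
      · rw [add_assoc]
        exact ih x _

lemma foldBS_shift (graph : List (Int × List Int)) (roadSet : List (Int × Int))
    (node parent : Int) (b : Nat) :
    ∀ (L : List Int) (x a : Int),
      L.foldl (fun count v => if v == parent then count
          else count + (if roadSet.contains (node, v) then 1 else 0) + dfsRecB graph roadSet b v node) (x + a)
        = x + L.foldl (fun count v => if v == parent then count
            else count + (if roadSet.contains (node, v) then 1 else 0) + dfsRecB graph roadSet b v node) a := by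
  intro L
  induction L with
  | nil => intro x a; rfl
  | cons v L ih =>
      intro x a
      simp only [List.foldl_cons]
      split
      · exact ih x a
      · rw [add_assoc x a, add_assoc x]
        exact ih x _

lemma stepA_zero (graph : List (Int × List Int)) (roadSet : List (Int × Int)) (node parent : Int) :
    ∀ (L : List Int) (s : List ((Int × Int) × Nat)) (c : Int),
      (L.foldl (dfsBodyA roadSet node parent 0) (s, c)).2
          + pvS graph roadSet ((L.foldl (dfsBodyA roadSet node parent 0) (s, c)).1)
        = c + pvS graph roadSet s
          + L.foldl (fun count v => if v == parent then count
              else count + (if roadSet.contains (node, v) then 1 else 0)) 0 := by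
  intro L
  induction L with
  | nil => intro s c; simp
  | cons v L ih =>
      intro s c
      simp only [List.foldl_cons, dfsBodyA]
      split
      · exact ih s c
      · simp only [show ((0 : Nat) == 0) = true by simp, if_true]
        rw [show (0 : Int) + (if roadSet.contains (node, v) then 1 else 0)
            = (if roadSet.contains (node, v) then (1 : Int) else 0) + 0 by ring,
          foldB0_shift]
        have := ih s (c + (if roadSet.contains (node, v) then 1 else 0))
        omega

lemma stepA_succ (graph : List (Int × List Int)) (roadSet : List (Int × Int))
    (node parent : Int) (b' : Nat) :
    ∀ (L : List Int) (s : List ((Int × Int) × Nat)) (c : Int),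
      (L.foldl (dfsBodyA roadSet node parent (b' + 1)) (s, c)).2
          + pvS graph roadSet ((L.foldl (dfsBodyA roadSet node parent (b' + 1)) (s, c)).1)
        = c + pvS graph roadSet s
          + L.foldl (fun count v => if v == parent then count
              else count + (if roadSet.contains (node, v) then 1 else 0)
                + dfsRecB graph roadSet b' v node) 0 := by
  intro L
  induction L with
  | nil => intro s c; simp
  | cons v L ih =>
      intro s c
      simp only [List.foldl_cons, dfsBodyA]
      split
      · exact ih s c
      · simp only [show ((b' + 1 : Nat) == 0) = false by simp, Bool.false_eq_true, if_false,
          Nat.add_sub_cancel]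
        rw [show (0 : Int) + (if roadSet.contains (node, v) then 1 else 0) + dfsRecB graph roadSet b' v node
            = ((if roadSet.contains (node, v) then (1 : Int) else 0) + dfsRecB graph roadSet b' v node) + 0 by ring,
          foldBS_shift]
        have := ih ((((v, node), b')) :: s) (c + (if roadSet.contains (node, v) then 1 else 0))
        have hcons : pvS graph roadSet ((((v, node), b')) :: s)
            = dfsRecB graph roadSet b' v node + pvS graph roadSet s := by simp [pvS]
        omega

lemma loop_inv (graph : List (Int × List Int)) (roadSet : List (Int × Int)) :
    ∀ (n : Nat) (st : List ((Int × Int) × Nat)) (c : Int),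
      stackM (pvW graph) st ≤ n → dfsLoop graph roadSet st c = c + pvS graph roadSet st := by
  intro n
  induction n with
  | zero =>
      intro st c h
      cases st with
      | nil => simp [dfsLoop, pvS]
      | cons e rest =>
          exfalso
          have hpos : 0 < (pvW graph + 1) ^ e.2 := Nat.pow_pos (by omega)
          simp only [stackM, List.map_cons, List.sum_cons] at h
          omega
  | succ n ih =>
      intro st c h
      cases st with
      | nil => simp [dfsLoop, pvS]
      | cons e rest =>
          obtain ⟨⟨node, parent⟩, b⟩ := e
          rw [dfsLoop]
          have hlt := fold_fst_lt graph roadSet node parent b rest c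
          have hcons : stackM (pvW graph) (((node, parent), b) :: rest)
              = (pvW graph + 1) ^ b + stackM (pvW graph) rest := by simp [stackM]
          have h2 : stackM (pvW graph)
              ((((((PySem.Dict.mk graph).get? node).getD []).foldl
                (dfsBodyA roadSet node parent b) (rest, c))).1) ≤ n := by omega
          rw [ih _ _ h2]
          have hS : pvS graph roadSet (((node, parent), b) :: rest)
              = dfsRecB graph roadSet b node parent + pvS graph roadSet rest := by simp [pvS]
          cases b with
          | zero =>
              have hstep := stepA_zero graph roadSet node parent
                (((PySem.Dict.mk graph).get? node).getD []) rest c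
              have hB : dfsRecB graph roadSet 0 node parent
                  = (((PySem.Dict.mk graph).get? node).getD []).foldl
                      (fun count v => if v == parent then count
                        else count + (if roadSet.contains (node, v) then 1 else 0)) 0 := by
                rw [dfsRecB]
              omega
          | succ b' =>
              have hstep := stepA_succ graph roadSet node parent b'
                (((PySem.Dict.mk graph).get? node).getD []) rest c
              have hB : dfsRecB graph roadSet (b' + 1) node parent
                  = (((PySem.Dict.mk graph).get? node).getD []).foldl
                      (fun count v => if v == parent then count
                        else count + (if roadSet.contains (node, v) then 1 else 0)
                          + dfsRecB graph roadSet b' v node) 0 := by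
                rw [dfsRecB]
              omega

lemma dfs_eq_alt (start : Int) (graph : List (Int × List Int)) (roadSet : List (Int × Int)) :
    dfs start graph roadSet = dfs_alt start graph roadSet := by
  unfold dfs dfs_alt
  rw [loop_inv graph roadSet (stackM (pvW graph) [((start, -1), pvW graph + 1)]) _ _ (le_refl _)]
  simp [pvS]

-- ===== VERDICT (by name: the statement is the Claim_ definition above) =====
theorem dfs_spec : Claim_equal_dfs := by
  intro start graph roadSet _ _
  unfold Spec_dfs
  exact dfs_eq_alt start graph roadSet
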